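-- pv_equiv track=rewrite | github.com/kgwiazdak/ASD_and_WDI-exercises- | Algorithms/Consistent substring.py | consistent_substring
-- ===== SOURCE A (Python) =====
-- def consistent_substring(T):
--     counter = suma = 0
--     biggest = 0
--     for element in T:
--         suma+=element
--         if suma<0:
--             suma=0
--         else:
--             biggest=max(biggest, suma)
--     return biggest
-- ===== SOURCE B (Python) =====
-- def consistent_substring(T):
--     p = 0
--     lowest = 0
--     biggest = 0
--     for element in T:
--         p += element
--         biggest = max(biggest, p - lowest)
--         lowest = min(lowest, p)
--     return biggest
-- ===== Notes on version B (the rewrite author's own statement) =====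
-- stated objective: alternative
-- what changed: Replaced the reset-to-zero running accumulator with a continuous prefix sum plus a running minimum-prefix tracker (answer = max of prefix minus earlier minimum prefix), so the accumulator is never reset.
import Mathlib
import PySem

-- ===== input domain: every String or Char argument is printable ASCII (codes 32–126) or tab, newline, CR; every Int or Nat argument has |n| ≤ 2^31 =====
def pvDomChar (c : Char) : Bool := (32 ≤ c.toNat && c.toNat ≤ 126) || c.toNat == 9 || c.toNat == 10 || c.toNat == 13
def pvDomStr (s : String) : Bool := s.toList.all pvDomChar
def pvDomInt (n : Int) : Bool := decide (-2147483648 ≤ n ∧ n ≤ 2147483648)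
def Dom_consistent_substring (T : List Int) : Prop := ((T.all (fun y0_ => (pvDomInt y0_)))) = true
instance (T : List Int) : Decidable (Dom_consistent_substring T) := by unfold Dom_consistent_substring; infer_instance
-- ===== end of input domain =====

-- B replaces A's reset-to-zero accumulator with a continuous prefix sum and a running
-- minimum-prefix tracker (alternative decomposition, same O(n) cost).

-- ===== PORT A =====
-- state = (suma, biggest); the unused Python variable `counter` is dropped
def consistent_substring (T : List Int) : Int :=
  (T.foldl (fun (st : Int × Int) element =>
      let suma := st.1 + element
      if suma < 0 then (0, st.2) else (suma, max st.2 suma))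
    (0, 0)).2

-- ===== PORT B =====
-- state = (p, biggest, lowest)
def consistent_substring_alt (T : List Int) : Int :=
  (T.foldl (fun (st : Int × Int × Int) element =>
      let p := st.1 + element
      let b := max st.2.1 (p - st.2.2)
      let low := min st.2.2 p
      (p, b, low))
    (0, 0, 0)).2.1

-- ===== PRECONDITION & SPEC =====
def Spec_consistent_substring (T : List Int) (out : Int) : Prop := out = consistent_substring_alt T
instance (T : List Int) (out : Int) : Decidable (Spec_consistent_substring T out) := by unfold Spec_consistent_substring; infer_instance

-- ===== CLAIM (what is proved, stated in full; the proofs are below) =====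
def Claim_equal_consistent_substring : Prop := ∀ (T : List Int), Dom_consistent_substring T → Spec_consistent_substring T (consistent_substring T)

-- ===== LEMMAS AND PROOFS =====

-- Invariant: A's suma equals B's p - lowest, and the biggests coincide (given biggest ≥ 0).
theorem consistent_substring_key (T : List Int) : ∀ (p low b : Int), 0 ≤ b →
    (T.foldl (fun (st : Int × Int) element =>
        let suma := st.1 + element
        if suma < 0 then (0, st.2) else (suma, max st.2 suma))
      (p - low, b)).2
    = (T.foldl (fun (st : Int × Int × Int) element =>
        let p := st.1 + element
        let b := max st.2.1 (p - st.2.2)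
        let low := min st.2.2 p
        (p, b, low))
      (p, b, low)).2.1 := by
  induction T with
  | nil => intro p low b hb; rfl
  | cons e rest ih =>
    intro p low b hb
    simp only [List.foldl_cons]
    by_cases h : p - low + e < 0
    · have h1 : max b (p + e - low) = b := by omega
      have h2 : min low (p + e) = p + e := by omega
      have h3 : (p + e) - (p + e) = (0 : Int) := by omega
      simp only [if_pos h, h1, h2]
      have := ih (p + e) (p + e) b hb
      rw [h3] at this
      exact this
    · have h2 : min low (p + e) = low := by omega
      simp only [if_neg h, h2]
      have := ih (p + e) low (max b ((p + e) - low)) (by omega)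
      have h1 : p + e - low = p - low + e := by ring
      simp only [h1] at this ⊢
      exact this

-- ===== VERDICT (by name: the statement is the Claim_ definition above) =====
theorem consistent_substring_spec : Claim_equal_consistent_substring := by
  intro T _
  unfold Spec_consistent_substring consistent_substring consistent_substring_alt
  have := consistent_substring_key T 0 0 0 le_rfl
  simpa using this
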